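-- pv_equiv track=rewrite | github.com/tildedave/cryptopals-set8 | problem63.py | element_divmod
-- ===== SOURCE A (Python) =====
-- from typing import List, Optional, Tuple
--
-- FieldElement = int  # Element of GF(2^128)
--
-- def element_degree(p1: FieldElement):
--     return p1.bit_length() - 1
--
-- def element_divmod(a: FieldElement,
--                    b: FieldElement,
--                    ) -> Tuple[FieldElement, FieldElement]:
--     """
--     Returns (a // b, a % b)
--     """
--     q, r = 0, a
--
--     while element_degree(r) >= element_degree(b):
--         d = element_degree(r) - element_degree(b)
--         q = q ^ (1 << d)
--         r = r ^ (b << d)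
--
--     return q, r
-- ===== SOURCE B (Python) =====
-- def element_divmod(a, b):
--     """
--     Returns (a // b, a % b)
--     """
--     db = b.bit_length() - 1
--     q = r = 0
--     for i in reversed(range(a.bit_length())):
--         r = (r << 1) | ((a >> i) & 1)
--         if (r >> db) & 1:
--             r ^= b
--             q = (q << 1) | 1
--         else:
--             q = q << 1
--     return q, r
-- ===== Notes on version B (the rewrite author's own statement) =====
-- stated objective: alternative
-- what changed: B does streaming (hardware/LFSR-style) long division: instead of XOR-subtracting shifted copies of b from the whole dividend while re-measuring its degree, it shifts the dividend's bits one at a time into a small remainder register that it reduces by the UNSHIFTED b whenever the register's top bit is set, building the quotient by left-shifts; b is never shifted and the remainder register never exceeds deg(b)+1 bits.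
-- outside the precondition, e.g. on element_divmod(13, -3): A does not finish within the time limit, B returns (4, -7); on element_divmod(-13, 3): A returns (4, -1), B returns (1, 0); on element_divmod(5, 0): A does not finish within the time limit, B raises ValueError
import Mathlib
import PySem

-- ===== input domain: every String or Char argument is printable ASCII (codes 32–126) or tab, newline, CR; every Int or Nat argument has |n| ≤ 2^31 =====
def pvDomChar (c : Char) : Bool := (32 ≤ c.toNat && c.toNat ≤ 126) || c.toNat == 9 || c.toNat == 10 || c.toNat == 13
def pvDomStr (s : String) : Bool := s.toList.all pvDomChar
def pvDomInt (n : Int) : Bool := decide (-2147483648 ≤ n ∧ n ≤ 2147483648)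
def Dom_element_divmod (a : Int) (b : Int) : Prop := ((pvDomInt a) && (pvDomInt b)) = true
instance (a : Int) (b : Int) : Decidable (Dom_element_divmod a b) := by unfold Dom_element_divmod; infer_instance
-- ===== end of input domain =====

-- B replaces A's XOR-subtraction of shifted copies of b from the full dividend by streaming
-- (hardware-style) division: the dividend's bits are shifted one at a time into a small remainder
-- register reduced by the UNSHIFTED b whenever its top bit is set (objective: alternative).

-- ===== PORT A =====
def element_degree (p1 : Int) : Int := (PySem.Int.bitLength p1 : Int) - 1

-- A's while loop; the fuel only makes the recursion total: on Pre_ (0 ≤ a, 0 < b) each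
-- iteration strictly decreases bitLength r, so bitLength a + 1 iterations always suffice.
-- The shift amount d is nonnegative whenever the guard holds on Pre_, so `.toNat` is exact there.
def edLoop (b : Int) : Nat → Int → Int → Int × Int
  | 0, q, r => (q, r)
  | fuel+1, q, r =>
    if element_degree r ≥ element_degree b then
      let d := element_degree r - element_degree b
      edLoop b fuel (PySem.Int.bxor q ((1 : Int) <<< d.toNat)) (PySem.Int.bxor r (b <<< d.toNat))
    else (q, r)

def element_divmod (a : Int) (b : Int) : Int × Int :=
  edLoop b (PySem.Int.bitLength a + 1) 0 a

-- ===== PORT B =====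
-- body of B's `for i in reversed(range(a.bit_length()))`:
--   r = (r << 1) | ((a >> i) & 1); if r >> db & 1: r ^= b; q = (q << 1) | 1 else: q = q << 1
-- (the shift amounts i and db are nonnegative for every admitted input, so `.toNat` is exact there)
def edBStep (a : Int) (b : Int) (db : Int) (qr : Int × Int) (i : Int) : Int × Int :=
  let r := PySem.Int.bor (qr.2 <<< (1 : Nat)) (PySem.Int.band (a >>> i.toNat) 1)
  if PySem.Int.band (r >>> db.toNat) 1 ≠ 0 then
    (PySem.Int.bor (qr.1 <<< (1 : Nat)) 1, PySem.Int.bxor r b)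
  else (qr.1 <<< (1 : Nat), r)

def element_divmod_alt (a : Int) (b : Int) : Int × Int :=
  let db : Int := (PySem.Int.bitLength b : Int) - 1
  (PySem.List.pyRange ((PySem.Int.bitLength a : Int) - 1) (-1) (-1)).foldl (edBStep a b db) (0, 0)

-- ===== PRECONDITION & SPEC =====
-- Pre_ keeps the function's natural domain — nonnegative dividend and positive divisor (GF(2)
-- polynomials) — plus the negative-divisor inputs with bitLength a < bitLength b, on which neither
-- loop ever reduces. The other inputs are excluded: A infinite-loops whenever b = 0 and on many
-- negative inputs (e.g. (13, -3)), and on the remaining negative inputs A returns accidental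
-- two's-complement values (e.g. a negative remainder at (-13, 3)) that are artifacts of Python's
-- signed bitwise semantics.
def Pre_element_divmod (a : Int) (b : Int) : Prop :=
  0 ≤ a ∧ b ≠ 0 ∧ (0 < b ∨ PySem.Int.bitLength a < PySem.Int.bitLength b)
instance (a : Int) (b : Int) : Decidable (Pre_element_divmod a b) := by unfold Pre_element_divmod; infer_instance

def pvWitness_element_divmod : Int × Int := (13, 3)

def Spec_element_divmod (a : Int) (b : Int) (out : Int × Int) : Prop := out = element_divmod_alt a b
instance (a : Int) (b : Int) (out : Int × Int) : Decidable (Spec_element_divmod a b out) := by unfold Spec_element_divmod; infer_instance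

-- ===== CLAIM (what is proved, stated in full; the proofs are below) =====
def Claim_equal_element_divmod : Prop := ∀ (a : Int) (b : Int), Dom_element_divmod a b → Pre_element_divmod a b → Spec_element_divmod a b (element_divmod a b)

-- ===== LEMMAS AND PROOFS =====

-- proof-only intermediate program: the classical descending scan over quotient-bit positions.
-- A's while loop is first shown equal to this scan (lemma `sim`), which is then shown equal to
-- B's streaming fold (lemmas `peel` and `streamSim`).
def edDStep (b : Int) (db : Int) (qr : Int × Int) (i : Int) : Int × Int :=
  if PySem.Int.band (qr.2 >>> (db + i).toNat) 1 ≠ 0 then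
    (PySem.Int.bor qr.1 ((1 : Int) <<< i.toNat), PySem.Int.bxor qr.2 (b <<< i.toNat))
  else qr

theorem natCast_shiftLeft' (m k : Nat) : (↑m : Int) <<< k = ↑(m <<< k) := rfl
theorem natCast_shiftRight' (m k : Nat) : (↑m : Int) >>> k = ↑(m >>> k) := rfl

theorem bitLength_le_of_lt {m k : Nat} (h : m < 2^k) : PySem.Int.bitLength (↑m : Int) ≤ k := by
  by_contra hc
  rcases Nat.eq_zero_or_pos m with h0 | h0
  · subst h0
    simp [PySem.Int.bitLength_zero] at hc
  · have hne : (↑m : Int) ≠ 0 := by exact_mod_cast Nat.pos_iff_ne_zero.mp h0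
    have h2 := PySem.Int.two_pow_bitLength_le _ hne
    rw [Int.natAbs_natCast] at h2
    have : 2^k ≤ 2^(PySem.Int.bitLength (↑m : Int) - 1) := Nat.pow_le_pow_right (by norm_num) (by omega)
    omega

theorem le_bitLength_of_le {m k : Nat} (h : 2^k ≤ m) : k + 1 ≤ PySem.Int.bitLength (↑m : Int) := by
  have h2 := PySem.Int.lt_two_pow_bitLength (↑m : Int)
  rw [Int.natAbs_natCast] at h2
  by_contra hc
  have : 2^(PySem.Int.bitLength (↑m : Int)) ≤ 2^k := Nat.pow_le_pow_right (by norm_num) (by omega)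
  omega

theorem bitLength_eq {m k : Nat} (h1 : 2^k ≤ m) (h2 : m < 2^(k+1)) :
    PySem.Int.bitLength (↑m : Int) = k + 1 :=
  le_antisymm (bitLength_le_of_lt h2) (le_bitLength_of_le h1)

theorem testBit_top {x k : Nat} (h1 : 2^k ≤ x) (h2 : x < 2^(k+1)) : x.testBit k = true := by
  have hd : x / 2^k = 1 := by
    have hp : 0 < 2^k := Nat.two_pow_pos k
    have l1 : 1 ≤ x / 2^k := (Nat.le_div_iff_mul_le hp).mpr (by omega)
    have l2 : x / 2^k < 2 := (Nat.div_lt_iff_lt_mul hp).mpr (by rw [pow_succ] at h2; omega)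
    omega
  simp [Nat.testBit, Nat.shiftRight_eq_div_pow, hd]

theorem xor_top_lt {x y k : Nat} (hx1 : 2^k ≤ x) (hx2 : x < 2^(k+1))
    (hy1 : 2^k ≤ y) (hy2 : y < 2^(k+1)) : x ^^^ y < 2^k := by
  rcases Nat.eq_zero_or_pos (x ^^^ y) with hz | hz
  · rw [hz]; exact Nat.two_pow_pos k
  apply Nat.lt_of_testBit k
  · rw [Nat.testBit_xor, testBit_top hx1 hx2, testBit_top hy1 hy2]; rfl
  · exact Nat.testBit_two_pow_self
  · intro j hj
    have hxj : x.testBit j = false := Nat.testBit_lt_two_pow (lt_of_lt_of_le hx2 (Nat.pow_le_pow_right (by norm_num) hj))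
    have hyj : y.testBit j = false := Nat.testBit_lt_two_pow (lt_of_lt_of_le hy2 (Nat.pow_le_pow_right (by norm_num) hj))
    rw [Nat.testBit_xor, hxj, hyj, Nat.testBit_two_pow]
    simp; omega

-- low bits below position i are disjoint from a high part: or is add
theorem or_low_eq_add {a low i : Nat} (h : low < 2^i) : (2^i * a) ||| low = 2^i * a + low := by
  apply Nat.eq_of_testBit_eq
  intro j
  have h0 : (2^i * a + (0:Nat)).testBit j = if j < i then (0:Nat).testBit j else a.testBit (j - i) :=
    Nat.testBit_two_pow_mul_add a (Nat.two_pow_pos i) j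
  rw [Nat.testBit_or, Nat.testBit_two_pow_mul_add a h j, show 2^i*a = 2^i*a + 0 by omega, h0]
  by_cases hj : j < i
  · simp [hj]
  · have hlow : low.testBit j = false :=
      Nat.testBit_lt_two_pow (lt_of_lt_of_le h (Nat.pow_le_pow_right (by norm_num) (by omega)))
    simp [hj, hlow]

-- xoring a multiple of 2^i leaves the low bits alone
theorem xor_high {a c low i : Nat} (h : low < 2^i) :
    (2^i * a + low) ^^^ (2^i * c) = 2^i * (a ^^^ c) + low := by
  apply Nat.eq_of_testBit_eq
  intro j
  have h0 : (2^i * c + (0:Nat)).testBit j = if j < i then (0:Nat).testBit j else c.testBit (j - i) :=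
    Nat.testBit_two_pow_mul_add c (Nat.two_pow_pos i) j
  rw [Nat.testBit_xor, Nat.testBit_two_pow_mul_add a h j, Nat.testBit_two_pow_mul_add (a ^^^ c) h j,
    show 2^i*c = 2^i*c + 0 by omega, h0]
  by_cases hj : j < i
  · simp [hj]
  · simp [hj, Nat.testBit_xor]

theorem or2 (m : Nat) : 2 * m ||| 1 = 2 * m + 1 := by
  have := or_low_eq_add (a := m) (i := 1) (low := 1) (by norm_num)
  simpa [pow_one] using this

theorem high_div {a low i k : Nat} (h : low < 2^i) : (2^i * a + low) / 2^(i + k) = a / 2^k := by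
  rw [pow_add, ← Nat.div_div_eq_div_mul, Nat.mul_add_div (Nat.two_pow_pos i), Nat.div_eq_of_lt h]
  simp

-- the invariant on the quotient accumulator: all bits below n are clear
def Qinv (n q : Nat) : Prop := ∀ j, j < n → q.testBit j = false

theorem or_eq_xor_of_bit_false {m n : Nat} (h : m.testBit n = false) :
    m ||| 2^n = m ^^^ 2^n := by
  apply Nat.eq_of_testBit_eq
  intro j
  rw [Nat.testBit_or, Nat.testBit_xor, Nat.testBit_two_pow]
  by_cases hj : n = j
  · subst hj; simp [h]
  · simp [hj]

theorem sim (b : Int) (hb : 0 < b) (n : Nat) :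
    ∀ (fuel : Nat) (qn rn : Nat), n ≤ fuel →
      rn < 2^((PySem.Int.bitLength b - 1) + n) →
      Qinv n qn →
      edLoop b fuel (↑qn) (↑rn) =
        (PySem.List.pyRange ((n : Int) - 1) (-1) (-1)).foldl
          (edDStep b ((PySem.Int.bitLength b : Int) - 1)) (↑qn, ↑rn) := by
  have hbne : b ≠ 0 := by omega
  have hbb : 1 ≤ PySem.Int.bitLength b := by
    by_contra h
    have h2 := PySem.Int.lt_two_pow_bitLength b
    have h0 : PySem.Int.bitLength b = 0 := by omega
    rw [h0] at h2
    simp at h2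
    exact hbne (by omega)
  set bb := PySem.Int.bitLength b with hbbdef
  induction n with
  | zero =>
    intro fuel qn rn _ hr _
    have hguard : ¬ (element_degree (↑rn) ≥ element_degree b) := by
      have hle : PySem.Int.bitLength (↑rn : Int) ≤ bb - 1 := bitLength_le_of_lt hr
      simp only [element_degree, ge_iff_le, not_le]
      have : PySem.Int.bitLength (↑rn : Int) < bb := by omega
      omega
    have hnil : PySem.List.pyRange ((0 : Int) - 1) (-1) (-1) = [] :=
      PySem.List.pyRange_neg_one_eq_nil (by norm_num)
    rw [show ((0 : Nat) : Int) - 1 = (0 : Int) - 1 by norm_num, hnil]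
    cases fuel with
    | zero => rfl
    | succ f => simp [edLoop, hguard]
  | succ n ih =>
    intro fuel qn rn hfuel hr hq
    obtain ⟨f, rfl⟩ : ∃ f, fuel = f + 1 := ⟨fuel - 1, by omega⟩
    have hcons : PySem.List.pyRange (((n : Nat) + 1 : Int) - 1) (-1) (-1)
        = (↑n : Int) :: PySem.List.pyRange ((n : Int) - 1) (-1) (-1) := by
      have := PySem.List.pyRange_neg_one_cons (a := (↑n : Int)) (b := -1) (by omega)
      simpa using this
    have hcast : (((n : Nat) + 1 : Nat) : Int) - 1 = ((n : Nat) + 1 : Int) - 1 := by push_cast; ring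
    rw [hcast, hcons, List.foldl_cons]
    have htoNat : (((bb : Int) - 1) + (n : Int)).toNat = (bb - 1) + n := by omega
    by_cases hcase : rn < 2^((bb - 1) + n)
    · -- bit clear: the scan skips, A's loop state is unchanged at this position
      have hstep : edDStep b ((bb : Int) - 1) (↑qn, ↑rn) (↑n) = (↑qn, ↑rn) := by
        unfold edDStep
        have hsh : (↑rn : Int) >>> ((bb - 1) + n) = ↑(rn >>> ((bb - 1) + n)) := natCast_shiftRight' _ _
        have hz : rn >>> ((bb - 1) + n) = 0 := by
          rw [Nat.shiftRight_eq_div_pow]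
          exact Nat.div_eq_of_lt hcase
        simp [htoNat, hsh, hz, show PySem.Int.band 0 1 = 0 from by decide]
      rw [hstep]
      exact ih (f + 1) qn rn (by omega) hcase (fun j hj => hq j (by omega))
    · -- bit set: both sides xor b<<n into r and set bit n of q
      rw [not_lt] at hcase
      have hrhi : rn < 2^((bb - 1) + n + 1) := hr
      have hbl : PySem.Int.bitLength (↑rn : Int) = (bb - 1) + n + 1 := bitLength_eq hcase hrhi
      have hguard : element_degree (↑rn) ≥ element_degree b := by
        simp only [element_degree, ge_iff_le]
        rw [hbl]
        push_cast
        omega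
      have hd : element_degree (↑rn) - element_degree b = (n : Int) := by
        simp only [element_degree]
        rw [hbl]
        push_cast
        omega
      -- value of b as a natural number, with its bit bounds
      set bn := b.toNat with hbn
      have hbcast : b = (↑bn : Int) := (Int.toNat_of_nonneg (by omega)).symm
      have hbabs : b.natAbs = bn := by omega
      have hb1 : 2^(bb - 1) ≤ bn := by
        have h := PySem.Int.two_pow_bitLength_le b hbne
        rw [← hbbdef] at h
        omega
      have hb2 : bn < 2^bb := by
        have h := PySem.Int.lt_two_pow_bitLength b
        rw [← hbbdef] at h
        omega
      -- A's step
      have hA : edLoop b (f + 1) (↑qn) (↑rn)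
          = edLoop b f (↑(qn ^^^ 2^n)) (↑(rn ^^^ bn * 2^n)) := by
        show (if element_degree (↑rn : Int) ≥ element_degree b then _ else _) = _
        rw [if_pos hguard]
        show edLoop b f
            (PySem.Int.bxor (↑qn) ((1 : Int) <<< ((element_degree (↑rn : Int) - element_degree b).toNat)))
            (PySem.Int.bxor (↑rn) (b <<< ((element_degree (↑rn : Int) - element_degree b).toNat))) = _
        have e1 : PySem.Int.bxor (↑qn) ((1 : Int) <<< ((element_degree (↑rn : Int) - element_degree b).toNat))
            = ↑(qn ^^^ 2^n) := by
          rw [hd]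
          show PySem.Int.bxor (↑qn) ((1 : Int) <<< ((n : Int)).toNat) = _
          rw [show ((n : Int)).toNat = n by omega]
          rw [show (1 : Int) = ((1 : Nat) : Int) by norm_num, natCast_shiftLeft']
          rw [PySem.Int.bxor_natCast]
          norm_num [Nat.shiftLeft_eq]
        have e2 : PySem.Int.bxor (↑rn) (b <<< ((element_degree (↑rn : Int) - element_degree b).toNat))
            = ↑(rn ^^^ bn * 2^n) := by
          rw [hd]
          show PySem.Int.bxor (↑rn) (b <<< ((n : Int)).toNat) = _
          rw [show ((n : Int)).toNat = n by omega]
          rw [hbcast, natCast_shiftLeft', PySem.Int.bxor_natCast]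
          norm_num [Nat.shiftLeft_eq]
        rw [e1, e2]
      -- the scan's step
      have hBstep : edDStep b ((bb : Int) - 1) (↑qn, ↑rn) (↑n)
          = (↑(qn ^^^ 2^n), ↑(rn ^^^ bn * 2^n)) := by
        unfold edDStep
        have hsh : (↑rn : Int) >>> ((bb - 1) + n) = ↑(rn >>> ((bb - 1) + n)) := natCast_shiftRight' _ _
        have hone : rn >>> ((bb - 1) + n) = 1 := by
          rw [Nat.shiftRight_eq_div_pow]
          have hp : 0 < 2^((bb - 1) + n) := Nat.two_pow_pos _
          have l1 : 1 ≤ rn / 2^((bb - 1) + n) := (Nat.le_div_iff_mul_le hp).mpr (by omega)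
          have l2 : rn / 2^((bb - 1) + n) < 2 := (Nat.div_lt_iff_lt_mul hp).mpr
            (by rw [pow_succ] at hrhi; omega)
          omega
        have htest : PySem.Int.band ((↑rn : Int) >>> (((bb : Int) - 1) + (↑n : Int)).toNat) 1 ≠ 0 := by
          rw [htoNat, hsh, hone]
          rw [show (1 : Int) = ((1 : Nat) : Int) by norm_num, PySem.Int.band_natCast]
          norm_num
        rw [if_pos htest]
        have e1 : PySem.Int.bor (↑qn) ((1 : Int) <<< ((n : Int)).toNat) = ↑(qn ^^^ 2^n) := by
          rw [show ((n : Int)).toNat = n by omega]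
          rw [show (1 : Int) = ((1 : Nat) : Int) by norm_num, natCast_shiftLeft']
          rw [PySem.Int.bor_natCast]
          rw [Nat.shiftLeft_eq, one_mul, or_eq_xor_of_bit_false (hq n (by omega))]
        have e2 : PySem.Int.bxor (↑rn) (b <<< ((n : Int)).toNat) = ↑(rn ^^^ bn * 2^n) := by
          rw [show ((n : Int)).toNat = n by omega]
          rw [hbcast, natCast_shiftLeft', PySem.Int.bxor_natCast]
          norm_num [Nat.shiftLeft_eq]
        simp only [e1, e2]
      rw [hA, hBstep]
      -- invariants for the tail
      have hr' : rn ^^^ bn * 2^n < 2^((bb - 1) + n) := by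
        apply xor_top_lt hcase hrhi
        · calc 2^((bb - 1) + n) = 2^(bb - 1) * 2^n := (pow_add 2 _ _)
            _ ≤ bn * 2^n := Nat.mul_le_mul_right _ hb1
        · calc bn * 2^n < 2^bb * 2^n := (Nat.mul_lt_mul_right (Nat.two_pow_pos _)).mpr hb2
            _ = 2^((bb - 1) + n + 1) := by rw [← pow_add]; congr 1; omega
      have hq' : Qinv n (qn ^^^ 2^n) := by
        intro j hj
        rw [Nat.testBit_xor, hq j (by omega), Nat.testBit_two_pow]
        simp; omega
      exact ih f (qn ^^^ 2^n) (rn ^^^ bn * 2^n) (by omega) hr' hq'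

-- evaluation of B's streaming step on cast states: shift the next dividend bit into the register
theorem edBStep_eval (a b : Int) (db : Nat) (an : Nat) (ha : a = ↑an)
    (hdb : PySem.Int.bitLength b = db + 1) (Q S j : Nat) :
    edBStep a b ((PySem.Int.bitLength b : Int) - 1) (↑Q, ↑S) (↑j)
      = (if ((2 * S + (an >>> j) % 2) / 2^db) % 2 ≠ 0 then
          ((↑(2 * Q + 1) : Int), PySem.Int.bxor (↑(2 * S + (an >>> j) % 2)) b)
        else (↑(2 * Q), ↑(2 * S + (an >>> j) % 2))) := by
  unfold edBStep
  have htn : ((↑j : Int)).toNat = j := Int.toNat_natCast j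
  have hr : PySem.Int.bor ((↑S : Int) <<< (1 : Nat)) (PySem.Int.band (a >>> ((↑j : Int)).toNat) 1)
      = ↑(2 * S + (an >>> j) % 2) := by
    rw [htn, ha, natCast_shiftRight', natCast_shiftLeft',
      show (1 : Int) = ((1 : Nat) : Int) by norm_num, PySem.Int.band_natCast,
      PySem.Int.bor_natCast, Nat.and_one_is_mod]
    have : S <<< 1 = 2 * S := by rw [Nat.shiftLeft_eq]; ring
    rw [this]
    congr 1
    have := or_low_eq_add (a := S) (i := 1) (low := (an >>> j) % 2) (by omega)
    simpa [pow_one] using this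
  simp only [hr]
  have hdbt : ((PySem.Int.bitLength b : Int) - 1).toNat = db := by rw [hdb]; omega
  have hcond : PySem.Int.band ((↑(2 * S + (an >>> j) % 2) : Int) >>> ((PySem.Int.bitLength b : Int) - 1).toNat) 1
      = ↑(((2 * S + (an >>> j) % 2) / 2^db) % 2) := by
    rw [hdbt, natCast_shiftRight', show (1 : Int) = ((1 : Nat) : Int) by norm_num,
      PySem.Int.band_natCast, Nat.and_one_is_mod, Nat.shiftRight_eq_div_pow]
  rw [hcond]
  have hqn : Q <<< 1 = 2 * Q := by rw [Nat.shiftLeft_eq]; ring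
  have hq : (↑Q : Int) <<< (1 : Nat) = ↑(2 * Q) := by rw [natCast_shiftLeft', hqn]
  by_cases hc : ((2 * S + (an >>> j) % 2) / 2^db) % 2 = 0
  · have h1 : ¬ ((↑(((2 * S + (an >>> j) % 2) / 2^db) % 2) : Int) ≠ 0) := by simp [hc]
    have h2 : ¬ (((2 * S + (an >>> j) % 2) / 2^db) % 2 ≠ 0) := by simp [hc]
    rw [if_neg h1, if_neg h2, hq]
  · have h1 : ((↑(((2 * S + (an >>> j) % 2) / 2^db) % 2) : Int) ≠ 0) := by exact_mod_cast hc
    rw [if_pos h1, if_pos hc]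
    rw [hq, show (1 : Int) = ((1 : Nat) : Int) by norm_num, PySem.Int.bor_natCast]
    congr 2
    exact or2 Q

-- B's fold over the dividend's top bits never reduces: it only reconstructs a >> j in the register
theorem peel (a b : Int) (db : Nat) (an : Nat) (ha : a = ↑an)
    (hdb : PySem.Int.bitLength b = db + 1) (j : Nat) :
    ∀ t : Nat, t ≤ db → an >>> (j + t) < 2^(db - t) →
      (PySem.List.pyRange (((j + t : Nat) : Int) - 1) (-1) (-1)).foldl
        (edBStep a b ((PySem.Int.bitLength b : Int) - 1)) ((0 : Int), ↑(an >>> (j + t)))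
      = (PySem.List.pyRange (((j : Nat) : Int) - 1) (-1) (-1)).foldl
        (edBStep a b ((PySem.Int.bitLength b : Int) - 1)) ((0 : Int), ↑(an >>> j)) := by
  intro t
  induction t with
  | zero => intro _ _; rfl
  | succ t ih =>
    intro ht hbound
    have hcons : PySem.List.pyRange (((j + (t+1) : Nat) : Int) - 1) (-1) (-1)
        = (↑(j + t) : Int) :: PySem.List.pyRange ((↑(j + t) : Int) - 1) (-1) (-1) := by
      have := PySem.List.pyRange_neg_one_cons (a := (↑(j + t) : Int)) (b := -1) (by omega)
      have hc : (((j + (t+1) : Nat) : Int) - 1) = (↑(j + t) : Int) := by push_cast; ring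
      rw [hc]
      simpa using this
    rw [hcons, List.foldl_cons]
    have h1 : an >>> (j + (t+1)) = (an >>> (j + t)) / 2 := by
      rw [show j + (t+1) = (j + t) + 1 by ring, Nat.shiftRight_succ]
    rw [h1] at hbound
    have hsh : an >>> (j + t) = 2 * (an >>> (j + (t+1))) + (an >>> (j + t)) % 2 := by
      rw [h1]; omega
    have hy : an >>> (j + t) < 2^(db - t) := by
      have h2 : 2^(db - (t+1)) * 2 ≤ 2^(db - t) := by
        rw [← pow_succ]
        exact Nat.pow_le_pow_right (by norm_num) (by omega)
      omega
    have hstepz : (0 : Int) = ((0 : Nat) : Int) := by norm_num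
    rw [hstepz, edBStep_eval a b db an ha hdb 0 (an >>> (j + (t+1))) (j + t)]
    have hS' : 2 * (an >>> (j + (t+1))) + (an >>> (j + t)) % 2 = an >>> (j + t) := hsh.symm
    rw [hS']
    have hz : (an >>> (j + t)) / 2^db = 0 :=
      Nat.div_eq_of_lt (lt_of_lt_of_le hy (Nat.pow_le_pow_right (by norm_num) (by omega)))
    rw [if_neg (by simp [hz])]
    have h0 : ((2 * 0 : Nat) : Int) = ((0 : Nat) : Int) := by norm_num
    rw [h0, ← hstepz]
    exact ih (by omega) hy

-- the descending scan and B's streaming fold run in lock-step: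
-- scan state = (2^j * Q, 2^j * S + low bits of a), stream state = (Q, S)
theorem streamSim (a b : Int) (db : Nat) (an bn : Nat) (ha : a = ↑an) (hbcast : b = ↑bn)
    (hdb : PySem.Int.bitLength b = db + 1) (hb1 : 2^db ≤ bn) (hb2 : bn < 2^(db+1)) :
    ∀ (j Q S : Nat), S < 2^db →
      (PySem.List.pyRange (((j : Nat) : Int) - 1) (-1) (-1)).foldl
        (edDStep b ((PySem.Int.bitLength b : Int) - 1)) (↑(2^j * Q), ↑(2^j * S + an % 2^j))
      = (PySem.List.pyRange (((j : Nat) : Int) - 1) (-1) (-1)).foldl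
        (edBStep a b ((PySem.Int.bitLength b : Int) - 1)) (↑Q, ↑S) := by
  intro j
  induction j with
  | zero =>
    intro Q S _
    have hnil : PySem.List.pyRange (((0 : Nat) : Int) - 1) (-1) (-1) = [] :=
      PySem.List.pyRange_neg_one_eq_nil (by norm_num)
    rw [hnil]
    simp
  | succ j ih =>
    intro Q S hS
    have hcons : PySem.List.pyRange (((j + 1 : Nat) : Int) - 1) (-1) (-1)
        = (↑j : Int) :: PySem.List.pyRange ((↑j : Int) - 1) (-1) (-1) := by
      have := PySem.List.pyRange_neg_one_cons (a := (↑j : Int)) (b := -1) (by omega)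
      have hc : (((j + 1 : Nat) : Int) - 1) = (↑j : Int) := by push_cast; ring
      rw [hc]
      simpa using this
    rw [hcons, List.foldl_cons, List.foldl_cons]
    set y := (an >>> j) % 2 with hy
    set S' := 2 * S + y with hS'
    set low := an % 2^j with hlow
    have hylt : y < 2 := Nat.mod_lt _ (by norm_num)
    have hlowlt : low < 2^j := Nat.mod_lt _ (Nat.two_pow_pos j)
    have hrsplit : 2^(j+1) * S + an % 2^(j+1) = 2^j * S' + low := by
      have hm : an % 2^(j+1) = an % 2^j + 2^j * (an / 2^j % 2) := Nat.mod_pow_succ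
      have hshr : an >>> j = an / 2^j := Nat.shiftRight_eq_div_pow an j
      rw [hm, hS', hy, hshr]
      ring
    have hqsplit : 2^(j+1) * Q = 2^j * (2 * Q) := by ring
    have hS'lt : S' < 2^(db+1) := by
      have : 2^db * 2 = 2^(db+1) := (pow_succ 2 db).symm
      omega
    -- evaluate the scan's step at position j
    have hdbt : ((PySem.Int.bitLength b : Int) - 1 + (↑j : Int)).toNat = db + j := by
      rw [hdb]; omega
    have hdiv : (2^j * S' + low) >>> (db + j) = S' / 2^db := by
      rw [Nat.shiftRight_eq_div_pow, show db + j = j + db by ring]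
      exact high_div hlowlt
    have hcondD : PySem.Int.band ((↑(2^j * S' + low) : Int) >>> ((PySem.Int.bitLength b : Int) - 1 + (↑j : Int)).toNat) 1
        = ↑((S' / 2^db) % 2) := by
      rw [hdbt, natCast_shiftRight', show (1 : Int) = ((1 : Nat) : Int) by norm_num,
        PySem.Int.band_natCast, Nat.and_one_is_mod, hdiv]
    by_cases hc : 2^db ≤ S'
    · -- top bit of the register is set: both sides reduce by b
      have hdv : S' / 2^db = 1 := by
        have l2 : S' / 2^db < 2 := (Nat.div_lt_iff_lt_mul (Nat.two_pow_pos db)).mpr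
          (by rw [pow_succ] at hS'lt; omega)
        have l1 : 1 ≤ S' / 2^db := (Nat.le_div_iff_mul_le (Nat.two_pow_pos db)).mpr (by omega)
        omega
      have hDstep : edDStep b ((PySem.Int.bitLength b : Int) - 1)
          (↑(2^(j+1) * Q), ↑(2^(j+1) * S + an % 2^(j+1))) (↑j)
          = (↑(2^j * (2 * Q + 1)), ↑(2^j * (S' ^^^ bn) + low)) := by
        unfold edDStep
        rw [hrsplit, hqsplit]
        rw [if_pos (by rw [hcondD, hdv]; norm_num)]
        have e1 : PySem.Int.bor (↑(2^j * (2 * Q)) : Int) ((1 : Int) <<< ((↑j : Int)).toNat)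
            = ↑(2^j * (2 * Q + 1)) := by
          rw [Int.toNat_natCast, show (1 : Int) = ((1 : Nat) : Int) by norm_num,
            natCast_shiftLeft', PySem.Int.bor_natCast]
          congr 1
          have hd : (2 * Q + 1) <<< j = (2 * Q) <<< j ||| 1 <<< j := by
            rw [← or2, Nat.shiftLeft_or_distrib]
          rw [show 2^j * (2 * Q) = (2 * Q) <<< j by rw [Nat.shiftLeft_eq]; ring, ← hd,
            Nat.shiftLeft_eq]
          ring
        have e2 : PySem.Int.bxor (↑(2^j * S' + low) : Int) (b <<< ((↑j : Int)).toNat)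
            = ↑(2^j * (S' ^^^ bn) + low) := by
          rw [Int.toNat_natCast, hbcast, natCast_shiftLeft', PySem.Int.bxor_natCast]
          congr 1
          rw [Nat.shiftLeft_eq, show bn * 2^j = 2^j * bn by ring]
          exact xor_high hlowlt
        rw [e1, e2]
      have hBstep : edBStep a b ((PySem.Int.bitLength b : Int) - 1) (↑Q, ↑S) (↑j)
          = (↑(2 * Q + 1), ↑(S' ^^^ bn)) := by
        rw [edBStep_eval a b db an ha hdb Q S j, ← hy, ← hS']
        rw [if_pos (by rw [hdv]; norm_num)]
        rw [hbcast, PySem.Int.bxor_natCast]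
      rw [hDstep, hBstep]
      exact ih (2 * Q + 1) (S' ^^^ bn) (xor_top_lt hc hS'lt hb1 hb2)
    · -- top bit clear: the scan leaves its state, the stream only shifts
      have hdv : S' / 2^db = 0 := Nat.div_eq_of_lt (by omega)
      have hDstep : edDStep b ((PySem.Int.bitLength b : Int) - 1)
          (↑(2^(j+1) * Q), ↑(2^(j+1) * S + an % 2^(j+1))) (↑j)
          = (↑(2^j * (2 * Q)), ↑(2^j * S' + low)) := by
        unfold edDStep
        rw [hrsplit, hqsplit]
        rw [if_neg (by rw [hcondD, hdv]; norm_num)]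
      have hBstep : edBStep a b ((PySem.Int.bitLength b : Int) - 1) (↑Q, ↑S) (↑j)
          = (↑(2 * Q), ↑S') := by
        rw [edBStep_eval a b db an ha hdb Q S j, ← hy, ← hS']
        rw [if_neg (by rw [hdv]; norm_num)]
      rw [hDstep, hBstep]
      exact ih (2 * Q) S' (by omega)

-- ===== VERDICT (by name: the statement is the Claim_ definition above) =====
theorem element_divmod_spec : Claim_equal_element_divmod := by
  unfold Claim_equal_element_divmod Spec_element_divmod
  intro a b _ ⟨ha, hbne, hdisj⟩
  have hbb : 1 ≤ PySem.Int.bitLength b := by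
    by_contra h
    have h2 := PySem.Int.lt_two_pow_bitLength b
    have h0 : PySem.Int.bitLength b = 0 := by omega
    rw [h0] at h2
    simp at h2
    exact hbne (by omega)
  obtain ⟨db, hdb⟩ : ∃ db, PySem.Int.bitLength b = db + 1 :=
    ⟨PySem.Int.bitLength b - 1, by omega⟩
  set an := a.toNat with han
  have hacast : a = (↑an : Int) := (Int.toNat_of_nonneg ha).symm
  set bla := PySem.Int.bitLength a with hbla
  have hblaan : an < 2^bla := by
    have h := PySem.Int.lt_two_pow_bitLength a
    rw [← hbla] at h
    omega
  show element_divmod a b = element_divmod_alt a b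
  have hBdef : element_divmod_alt a b
      = (PySem.List.pyRange ((bla : Int) - 1) (-1) (-1)).foldl
          (edBStep a b ((PySem.Int.bitLength b : Int) - 1)) (0, 0) := by
    show (PySem.List.pyRange ((PySem.Int.bitLength a : Int) - 1) (-1) (-1)).foldl
          (edBStep a b ((PySem.Int.bitLength b : Int) - 1)) (0, 0) = _
    rw [← hbla]
  by_cases hsmall : bla < db + 1
  · -- bla ≤ db: neither program ever reduces; A's guard fails at once, B only shifts a through
    have hguard : ¬ (element_degree a ≥ element_degree b) := by
      simp only [element_degree, ge_iff_le, not_le, ← hbla, hdb]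
      push_cast
      omega
    have hA : element_divmod a b = (0, a) := by
      unfold element_divmod
      rw [← hbla]
      show (if element_degree a ≥ element_degree b then _ else _) = _
      rw [if_neg hguard]
    have hzero : an >>> (0 + bla) = 0 := by
      rw [Nat.zero_add, Nat.shiftRight_eq_div_pow]
      exact Nat.div_eq_of_lt hblaan
    have hpeel := peel a b db an hacast hdb 0 bla (by omega) (by rw [hzero]; exact Nat.two_pow_pos _)
    rw [hzero] at hpeel
    simp only [Nat.zero_add, Nat.cast_zero, Nat.shiftRight_zero] at hpeel
    have hnil : PySem.List.pyRange (((0 : Nat) : Int) - 1) (-1) (-1) = [] :=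
      PySem.List.pyRange_neg_one_eq_nil (by norm_num)
    simp only [Nat.cast_zero] at hnil
    rw [hnil, List.foldl_nil] at hpeel
    rw [hA, hBdef, hpeel, ← hacast]
  · -- db < bla: here Pre_ forces 0 < b; the register fills in db steps, then the
    -- descending scan and the stream run in lock-step
    have hb : 0 < b := by
      rcases hdisj with hb | hlt
      · exact hb
      · exfalso; rw [hdb] at hlt; omega
    set n : Nat := bla - db with hn
    have hnb : n + db = bla := by omega
    -- A = descending scan
    have hsim := sim b hb n (bla + 1) 0 an (by omega)
      (by
        have he : PySem.Int.bitLength b - 1 + n = bla := by omega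
        rw [he]
        exact hblaan)
      (fun j _ => Nat.zero_testBit j)
    have hA : element_divmod a b
        = (PySem.List.pyRange ((n : Int) - 1) (-1) (-1)).foldl
            (edDStep b ((PySem.Int.bitLength b : Int) - 1)) (((0:Nat) : Int), ↑an) := by
      unfold element_divmod
      rw [← hbla, hacast, show (0:Int) = ((0:Nat):Int) from rfl]
      exact hsim
    -- descending scan = stream (streamSim), with the start state rewritten
    have hb1 : 2^db ≤ b.toNat := by
      have h := PySem.Int.two_pow_bitLength_le b hbne
      rw [hdb] at h
      simp only [Nat.add_sub_cancel] at h
      omega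
    have hb2 : b.toNat < 2^(db+1) := by
      have h := PySem.Int.lt_two_pow_bitLength b
      rw [hdb] at h
      omega
    have hSlt : an >>> n < 2^db := by
      rw [Nat.shiftRight_eq_div_pow]
      apply (Nat.div_lt_iff_lt_mul (Nat.two_pow_pos n)).mpr
      have he : 2^db * 2^n = 2^bla := by rw [← pow_add]; congr 1; omega
      rw [he]
      exact hblaan
    have hbtn : b = ((b.toNat : Nat) : Int) := (Int.toNat_of_nonneg (by omega)).symm
    have hstream := streamSim a b db an b.toNat hacast hbtn hdb hb1 hb2 n 0 (an >>> n) hSlt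
    have e1 : 2^n * 0 = 0 := by ring
    have e2 : 2^n * (an >>> n) + an % 2^n = an := by
      rw [Nat.shiftRight_eq_div_pow]
      exact Nat.div_add_mod an (2^n)
    rw [e1, e2] at hstream
    -- stream from (0, a >> n) = stream from (0, 0) over the full range (peel)
    have hzero : an >>> (n + db) = 0 := by
      rw [Nat.shiftRight_eq_div_pow, hnb]
      exact Nat.div_eq_of_lt hblaan
    have hpeel := peel a b db an hacast hdb n db (le_refl db)
      (by rw [hzero]; exact Nat.two_pow_pos _)
    rw [hzero, hnb] at hpeel
    simp only [Nat.cast_zero] at hstream hpeel hA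
    rw [hA, hBdef, hstream, ← hpeel]
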